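-- pv_equiv track=rewrite | github.com/dleemiller/CnakeCharmer | cnake_data/unpaired/adapter_hamming.py | find_adapter_positions
-- ===== SOURCE A (Python) =====
-- def hamming_distance(read, adapter, start=0):
--     compare_length = min(len(adapter), len(read) - start)
--     mismatches = 0
--     for i in range(compare_length):
--         if read[start + i] != adapter[i]:
--             mismatches += 1
--     return mismatches
--
-- def find_adapter_positions(read, adapter, min_comparison_length, max_distance):
--     max_start = len(read) - min_comparison_length
--     positions = []
--     for start in range(max_start + 1):
--         dist = hamming_distance(read, adapter, start)
--         if dist <= max_distance:
--             positions.append(start)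
--     return positions
-- ===== SOURCE B (Python) =====
-- def find_adapter_positions(read, adapter, min_comparison_length, max_distance):
--     n, m = len(read), len(adapter)
--     max_start = n - min_comparison_length
--     # index the adapter once: char -> list of adapter positions holding it
--     idx = {}
--     for i, c in enumerate(adapter):
--         idx[c] = idx.get(c, []) + [i]
--     # one pass over the read: each matching (read pos j, adapter pos i) pair
--     # credits one match to the diagonal start = j - i
--     matches = {}
--     for j, c in enumerate(read):
--         for i in idx.get(c, []):
--             matches[j - i] = matches.get(j - i, 0) + 1
--     # mismatches at start s = window length minus matches on diagonal s
--     out = []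
--     for s in range(max_start + 1):
--         compare = max(0, min(m, n - s))
--         if compare - matches.get(s, 0) <= max_distance:
--             out.append(s)
--     return out
-- ===== Notes on version B (the rewrite author's own statement) =====
-- stated objective: alternative
-- what changed: A re-scans the adapter window at every start (nested loops, O(n*m)); B indexes the adapter by character once, then a single pass over the read credits each equal-character (read,adapter) position pair to its diagonal in a counter dict, and mismatches at each start are window length minus that diagonal's match count.
import Mathlib
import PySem

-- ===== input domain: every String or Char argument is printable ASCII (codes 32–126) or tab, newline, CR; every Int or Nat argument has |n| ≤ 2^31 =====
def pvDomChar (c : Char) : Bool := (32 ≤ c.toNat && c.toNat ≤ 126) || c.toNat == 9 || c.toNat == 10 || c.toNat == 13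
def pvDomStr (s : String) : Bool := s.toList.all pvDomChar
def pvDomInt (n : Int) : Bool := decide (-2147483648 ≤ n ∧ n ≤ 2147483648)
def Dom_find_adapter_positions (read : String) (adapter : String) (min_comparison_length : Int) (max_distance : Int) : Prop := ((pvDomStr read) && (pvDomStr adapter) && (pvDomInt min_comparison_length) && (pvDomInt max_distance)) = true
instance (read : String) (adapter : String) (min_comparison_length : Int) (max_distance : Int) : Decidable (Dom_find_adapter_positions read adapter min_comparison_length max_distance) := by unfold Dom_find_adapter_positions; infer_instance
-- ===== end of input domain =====

-- ===== PORT A =====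
-- B replaces A's per-start rescan of the window by a one-pass per-character diagonal match counter (alternative algorithm, same worst-case cost).
def pvHamming (r : List Char) (a : List Char) (start : Int) : Int :=
  let compare_length := min (a.length : Int) ((r.length : Int) - start)
  (PySem.List.pyRange 0 compare_length 1).foldl
    (fun mismatches i =>
      if PySem.List.pyGet? r (start + i) ≠ PySem.List.pyGet? a i then mismatches + 1 else mismatches)
    0

def find_adapter_positions (read : String) (adapter : String) (min_comparison_length : Int) (max_distance : Int) : List Int :=
  let r := read.toList
  let a := adapter.toList
  let max_start := (r.length : Int) - min_comparison_length
  (PySem.List.pyRange 0 (max_start + 1) 1).foldl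
    (fun positions start =>
      if pvHamming r a start ≤ max_distance then positions ++ [start] else positions)
    []

-- ===== PORT B =====
def find_adapter_positions_alt (read : String) (adapter : String) (min_comparison_length : Int) (max_distance : Int) : List Int :=
  let r := read.toList
  let a := adapter.toList
  let n : Int := r.length
  let m : Int := a.length
  let max_start := n - min_comparison_length
  let idx : PySem.Dict Char (List Int) :=
    (PySem.List.enumerate a).foldl (fun d p => d.modify p.2 [] (· ++ [p.1])) PySem.Dict.empty
  let mtch : PySem.Dict Int Int :=
    (PySem.List.enumerate r).foldl
      (fun d p => (idx.getD p.2 []).foldl (fun d i => d.modify (p.1 - i) 0 (· + 1)) d)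
      PySem.Dict.empty
  (PySem.List.pyRange 0 (max_start + 1) 1).foldl
    (fun out s =>
      let compare := max 0 (min m (n - s))
      if compare - mtch.getD s 0 ≤ max_distance then out ++ [s] else out)
    []

-- ===== PRECONDITION & SPEC =====

def Spec_find_adapter_positions (read : String) (adapter : String) (min_comparison_length : Int) (max_distance : Int) (out : List Int) : Prop := out = find_adapter_positions_alt read adapter min_comparison_length max_distance
instance (read : String) (adapter : String) (min_comparison_length : Int) (max_distance : Int) (out : List Int) : Decidable (Spec_find_adapter_positions read adapter min_comparison_length max_distance out) := by unfold Spec_find_adapter_positions; infer_instance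

-- ===== CLAIM (what is proved, stated in full; the proofs are below) =====
def Claim_equal_find_adapter_positions : Prop := ∀ (read : String) (adapter : String) (min_comparison_length : Int) (max_distance : Int), Dom_find_adapter_positions read adapter min_comparison_length max_distance → Spec_find_adapter_positions read adapter min_comparison_length max_distance (find_adapter_positions read adapter min_comparison_length max_distance)

-- ===== LEMMAS AND PROOFS =====

-- adapter positions that hold character c, as B's index dict stores them
def pvIdxList (a : List Char) (c : Char) : List Int :=
  (((PySem.List.enumerate a).map (fun p => (p.2, p.1))).filter (fun q => q.1 == c)).map (·.2)

-- the multiset of diagonals credited by B's read pass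
def pvKeys (r : List Char) (a : List Char) : List Int :=
  (PySem.List.enumerate r).flatMap (fun p => (pvIdxList a p.2).map (fun i => p.1 - i))

lemma pvIdx_getD (a : List Char) (c : Char) :
    ((PySem.List.enumerate a).foldl (fun d p => d.modify p.2 [] (· ++ [p.1])) PySem.Dict.empty).getD c []
      = pvIdxList a c := by
  have h : (PySem.List.enumerate a).foldl (fun d p => d.modify p.2 [] (· ++ [p.1])) PySem.Dict.empty
      = ((PySem.List.enumerate a).map (fun p => (p.2, p.1))).foldl
          (fun d q => d.modify q.1 [] (· ++ [q.2])) PySem.Dict.empty := by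
    rw [List.foldl_map]
  rw [h, PySem.Dict.getD_foldl_modify_append]
  simp [pvIdxList]

lemma mem_pvIdxList (a : List Char) (c : Char) (j : Int) :
    j ∈ pvIdxList a c ↔ 0 ≤ j ∧ j < (a.length : Int) ∧ a[j.toNat]? = some c := by
  simp only [pvIdxList, List.mem_map, List.mem_filter, PySem.List.mem_enumerate_iff]
  constructor
  · rintro ⟨⟨c', j'⟩, ⟨⟨⟨i, ch⟩, ⟨k, hk, hp⟩, hc⟩, hbeq⟩, hj⟩
    cases hp; cases hc
    simp only at hbeq hj
    subst hj
    refine ⟨by omega, by omega, ?_⟩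
    have hkk : ((0 + (k:Int)).toNat) = k := by omega
    rw [hkk, List.getElem?_eq_getElem hk]
    simpa using (beq_iff_eq.1 hbeq)
  · rintro ⟨h0, hlt, hget⟩
    have hk : j.toNat < a.length := by omega
    rw [List.getElem?_eq_getElem hk] at hget
    refine ⟨(c, j), ⟨⟨(j, c), ⟨j.toNat, hk, ?_⟩, rfl⟩, by simp⟩, rfl⟩
    have h2 := Option.some_inj.1 hget
    simp only [Prod.mk.injEq]
    exact ⟨by omega, h2.symm⟩

lemma nodup_pvIdxList (a : List Char) (c : Char) : (pvIdxList a c).Nodup := by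
  have h : pvIdxList a c = ((PySem.List.enumerate a).filter (fun p => p.2 == c)).map (·.1) := by
    simp [pvIdxList, List.filter_map, List.map_map]; rfl
  rw [h]
  have hsub : (((PySem.List.enumerate a).filter (fun p => p.2 == c)).map (·.1)).Sublist
      ((PySem.List.enumerate a).map (·.1)) := (List.filter_sublist).map _
  have : ((PySem.List.enumerate a).map (·.1)).Nodup := by
    rw [show ((PySem.List.enumerate a).map (·.1)) = PySem.List.pyRange 0 (0 + (a.length:Int)) from PySem.List.map_fst_enumerate a 0]
    exact PySem.List.nodup_pyRange_one _ _
  exact this.sublist hsub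

lemma pvMatches_getD (r : List Char) (a : List Char) (s : Int) :
    ((PySem.List.enumerate r).foldl
        (fun d p => (pvIdxList a p.2).foldl (fun d i => d.modify (p.1 - i) 0 (· + 1)) d)
        PySem.Dict.empty).getD s 0 = ((pvKeys r a).count s : Int) := by
  have h1 : ∀ (d : PySem.Dict Int Int) (p : Int × Char),
      (pvIdxList a p.2).foldl (fun d i => d.modify (p.1 - i) 0 (· + 1)) d
        = ((pvIdxList a p.2).map (fun i => p.1 - i)).foldl (fun d x => d.modify x 0 (· + 1)) d := by
    intro d p
    rw [List.foldl_map]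
  simp only [h1]
  rw [← List.foldl_flatMap, ← pvKeys, PySem.Dict.getD_foldl_modify_add_one]
  simp

lemma pvCount_keys (r : List Char) (a : List Char) (s : Int) (hs : 0 ≤ s) :
    (pvKeys r a).count s
      = List.countP (fun i => decide (PySem.List.pyGet? r (s + i) = PySem.List.pyGet? a i))
          (PySem.List.pyRange 0 (min (a.length : Int) ((r.length : Int) - s)) 1) := by
  unfold pvKeys
  rw [List.count_flatMap]
  have hterm : ∀ p' ∈ PySem.List.enumerate r,
      (List.count s ∘ fun p => (pvIdxList a p.2).map (fun i => p.1 - i)) p'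
        = (fun p : Int × Char => if (p.1 - s) ∈ pvIdxList a p.2 then 1 else 0) p' := by
    intro p' _
    simp only [Function.comp]
    have hf : Function.Injective (fun i : Int => p'.1 - i) := by
      intro x y h; dsimp only at h; omega
    have hcnt : List.count s ((pvIdxList a p'.2).map (fun i => p'.1 - i))
        = List.count (p'.1 - s) (pvIdxList a p'.2) := by
      have h := List.count_map_of_injective (pvIdxList a p'.2) (fun i : Int => p'.1 - i) hf (p'.1 - s)
      simpa [show p'.1 - (p'.1 - s) = s by ring] using h
    rw [hcnt]
    by_cases hmem : (p'.1 - s) ∈ pvIdxList a p'.2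
    · rw [List.count_eq_one_of_mem (nodup_pvIdxList a p'.2) hmem, if_pos hmem]
    · rw [List.count_eq_zero_of_not_mem hmem, if_neg hmem]
  rw [List.map_congr_left hterm]
  rw [show PySem.List.enumerate r = (PySem.List.pyRange 0 (PySem.List.len r)).map
        (fun j => (j, PySem.List.pyGetD r j ' ')) from PySem.List.enumerate_eq_map_pyRange r ' ']
  rw [List.map_map]
  rw [show ((fun p : Int × Char => if (p.1 - s) ∈ pvIdxList a p.2 then 1 else 0) ∘
        (fun j => (j, PySem.List.pyGetD r j ' ')))
      = (fun j : Int => if (j - s) ∈ pvIdxList a (PySem.List.pyGetD r j ' ') then 1 else 0) from rfl]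
  rw [PySem.List.sum_map_ite_one_zero_nat']
  -- now: countP over [0, n) of diagonal membership = countP over [0, c) of window equality
  have hlen : PySem.List.len r = (r.length : Int) := by simp
  rw [hlen]
  set n : Int := (r.length : Int) with hn
  set m : Int := (a.length : Int) with hm
  have hm0 : 0 ≤ m := by positivity
  by_cases hns : n ≤ s
  · rw [PySem.List.pyRange_one_eq_nil (by omega : min m (n - s) ≤ 0)]
    rw [List.countP_eq_zero.2, List.countP_nil]
    intro j hj
    have hjr := PySem.List.mem_pyRange_one.1 hj
    simp only [decide_eq_true_eq, mem_pvIdxList]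
    omega
  · rw [not_le] at hns
    have hc0 : 0 ≤ min m (n - s) := by omega
    set c : Int := min m (n - s) with hc
    rw [PySem.List.pyRange_one_append 0 s n hs (by omega)]
    rw [PySem.List.pyRange_one_append s (s + c) n (by omega) (by omega)]
    rw [List.countP_append, List.countP_append]
    have h1 : List.countP (fun j => decide ((j - s) ∈ pvIdxList a (PySem.List.pyGetD r j ' ')))
        (PySem.List.pyRange 0 s) = 0 := by
      rw [List.countP_eq_zero]
      intro j hj
      have hjr := PySem.List.mem_pyRange_one.1 hj
      simp only [decide_eq_true_eq, mem_pvIdxList]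
      omega
    have h3 : List.countP (fun j => decide ((j - s) ∈ pvIdxList a (PySem.List.pyGetD r j ' ')))
        (PySem.List.pyRange (s + c) n) = 0 := by
      rw [List.countP_eq_zero]
      intro j hj
      have hjr := PySem.List.mem_pyRange_one.1 hj
      simp only [decide_eq_true_eq, mem_pvIdxList]
      omega
    rw [h1, h3]
    simp only [Nat.zero_add, Nat.add_zero]
    -- middle segment: reindex j = s + k
    rw [PySem.List.pyRange_one s (s + c), PySem.List.pyRange_one 0 c]
    rw [show s + c - s = c by ring, show c - 0 = c by ring]
    rw [List.countP_map, List.countP_map]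
    apply List.countP_congr
    intro k hk
    have hkc : (k : Int) < c := by
      have := List.mem_range.1 hk
      omega
    simp only [Function.comp, decide_eq_true_eq]
    have hkm : (k : Int) < m := by omega
    have hsn : s + (k : Int) < n := by omega
    have hnn : (0 : Int) ≤ s + k := by omega
    have hget_r : PySem.List.pyGet? r (s + (0 + (k:Int))) = some r[(s + (k:Int)).toNat] := by
      rw [show s + (0 + (k:Int)) = s + k by ring]
      rw [PySem.List.pyGet?_of_nonneg r hnn, List.getElem?_eq_getElem (by omega)]
    have hget_a : PySem.List.pyGet? a (0 + (k:Int)) = some a[k] := by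
      rw [show (0 + (k:Int)) = (k:Int) by ring, PySem.List.pyGet?_natCast,
        List.getElem?_eq_getElem (by omega : k < a.length)]
    have hgd : PySem.List.pyGetD r (s + (k:Int)) ' ' = r[(s + (k:Int)).toNat] := by
      rw [PySem.List.pyGetD_eq_getElem r ' ' hnn (by omega)]
    constructor
    · rintro hmem
      rw [show s + (k:Int) - s = (k:Int) by ring, hgd, mem_pvIdxList] at hmem
      obtain ⟨-, -, hg⟩ := hmem
      simp only [Int.toNat_natCast] at hg
      rw [List.getElem?_eq_getElem (by omega : k < a.length)] at hg
      rw [hget_r, hget_a, Option.some_inj]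
      exact (Option.some_inj.1 hg).symm
    · intro heq
      rw [hget_r, hget_a, Option.some_inj] at heq
      rw [show s + (k:Int) - s = (k:Int) by ring, hgd, mem_pvIdxList]
      refine ⟨by omega, by omega, ?_⟩
      simp only [Int.toNat_natCast]
      rw [List.getElem?_eq_getElem (by omega : k < a.length)]
      simp only [Option.some_inj]
      exact heq.symm

lemma pvHamming_eq (r : List Char) (a : List Char) (s : Int) :
    pvHamming r a s
      = ((PySem.List.pyRange 0 (min (a.length : Int) ((r.length : Int) - s)) 1).countP
          (fun i => decide (¬ PySem.List.pyGet? r (s + i) = PySem.List.pyGet? a i)) : Int) := by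
  unfold pvHamming
  rw [PySem.List.foldl_ite_add_one]
  simp

lemma pvCond (r : List Char) (a : List Char) (s : Int) (hs : 0 ≤ s) :
    pvHamming r a s
      = max 0 (min (a.length : Int) ((r.length : Int) - s))
        - ((PySem.List.enumerate r).foldl
            (fun d p => (pvIdxList a p.2).foldl (fun d i => d.modify (p.1 - i) 0 (· + 1)) d)
            PySem.Dict.empty).getD s 0 := by
  rw [pvHamming_eq, pvMatches_getD, pvCount_keys r a s hs]
  set c : Int := min (a.length : Int) ((r.length : Int) - s) with hc
  have hL : (PySem.List.pyRange 0 c).length = c.toNat := by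
    rw [PySem.List.length_pyRange_one]; omega
  have hsplit := List.length_eq_countP_add_countP
    (fun i => decide (PySem.List.pyGet? r (s + i) = PySem.List.pyGet? a i))
    (l := PySem.List.pyRange 0 c)
  have hne : List.countP (fun i => decide (¬ PySem.List.pyGet? r (s + i) = PySem.List.pyGet? a i))
      (PySem.List.pyRange 0 c)
      = List.countP (fun i => !(decide (PySem.List.pyGet? r (s + i) = PySem.List.pyGet? a i)))
        (PySem.List.pyRange 0 c) := by
    apply List.countP_congr
    intro x _
    simp
  rw [hne]
  rw [hL] at hsplit
  simp only [show (fun (i : Int) => !(decide (PySem.List.pyGet? r (s + i) = PySem.List.pyGet? a i)))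
      = (fun i => decide ¬(decide (PySem.List.pyGet? r (s + i) = PySem.List.pyGet? a i)) = true) from by
    funext i; simp] at hsplit ⊢
  omega

-- ===== VERDICT (by name: the statement is the Claim_ definition above) =====
theorem find_adapter_positions_spec : Claim_equal_find_adapter_positions := by
  intro read adapter mcl md _
  unfold Spec_find_adapter_positions find_adapter_positions find_adapter_positions_alt
  simp only [pvIdx_getD]
  simp only [PySem.List.foldl_append_ite_eq_filter, List.nil_append]
  apply List.filter_congr
  intro s hs
  have h0 : 0 ≤ s := (PySem.List.mem_pyRange_one.1 hs).1
  simp only [decide_eq_decide]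
  rw [pvCond read.toList adapter.toList s h0]
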